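-- pv_equiv track=rewrite | github.com/eanderson-skylar/Runaway | TextProcessing/Support/RunDate.py | proof_string
-- ===== SOURCE A (Python) =====
-- def proof_string(text):
--     patterns = {
--         'wenesday': 'wednesday',
--         '2d': '2nd',
--         '3d': '3rd'
--     }
--
--     for key in patterns:
--         text = text.replace(key, patterns[key])
--
--     return text
-- ===== SOURCE B (Python) =====
-- def proof_string(text):
--     patterns = {'wenesday': 'wednesday', '2d': '2nd', '3d': '3rd'}
--     out = []
--     i = 0
--     n = len(text)
--     while i < n:
--         for key, val in patterns.items():
--             if text.startswith(key, i):
--                 out.append(val)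
--                 i += len(key)
--                 break
--         else:
--             out.append(text[i])
--             i += 1
--     return ''.join(out)
-- ===== Notes on version B (the rewrite author's own statement) =====
-- stated objective: alternative
-- what changed: Replaces three sequential full-string .replace passes with one left-to-right scan that tries all three patterns at each position and builds the output once (single pass; slower in CPython since it trades C-level str.replace for a Python-level loop).
import Mathlib
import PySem

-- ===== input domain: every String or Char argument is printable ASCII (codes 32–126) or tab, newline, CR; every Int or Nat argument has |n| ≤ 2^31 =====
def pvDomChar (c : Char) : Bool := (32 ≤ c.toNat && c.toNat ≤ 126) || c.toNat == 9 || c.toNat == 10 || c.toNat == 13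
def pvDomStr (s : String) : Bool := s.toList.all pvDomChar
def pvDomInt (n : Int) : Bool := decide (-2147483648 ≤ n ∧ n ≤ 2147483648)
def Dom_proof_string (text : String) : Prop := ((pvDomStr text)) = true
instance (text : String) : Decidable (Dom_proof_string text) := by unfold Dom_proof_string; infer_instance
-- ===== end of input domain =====

-- B replaces A's three sequential full-string .replace passes by a single left-to-right
-- scan that matches all three patterns at each position (alternative single-pass algorithm).


-- ===== PORT A =====
-- A: text.replace('wenesday','wednesday').replace('2d','2nd').replace('3d','3rd'), in dict order
def proof_string (text : String) : String :=
  let t1 := PySem.Str.replace text "wenesday" "wednesday"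
  let t2 := PySem.Str.replace t1 "2d" "2nd"
  PySem.Str.replace t2 "3d" "3rd"

-- ===== PORT B =====
-- B: one left-to-right scan; at each position try the three patterns (dict order), else copy the char
def pvScanB (l : List Char) : List Char :=
  match l with
  | [] => []
  | c :: t =>
    if ['w','e','n','e','s','d','a','y'].isPrefixOf (c :: t) then
      ['w','e','d','n','e','s','d','a','y'] ++ pvScanB (t.drop 7)
    else if ['2','d'].isPrefixOf (c :: t) then
      ['2','n','d'] ++ pvScanB (t.drop 1)
    else if ['3','d'].isPrefixOf (c :: t) then
      ['3','r','d'] ++ pvScanB (t.drop 1)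
    else c :: pvScanB t
termination_by l.length
decreasing_by all_goals (simp only [List.length_cons, List.length_drop]; omega)

def proof_string_alt (text : String) : String :=
  String.ofList (pvScanB text.toList)

-- ===== PRECONDITION & SPEC =====
def Spec_proof_string (text : String) (out : String) : Prop := out = proof_string_alt text
instance (text : String) (out : String) : Decidable (Spec_proof_string text out) := by unfold Spec_proof_string; infer_instance

-- ===== CLAIM (what is proved, stated in full; the proofs are below) =====
def Claim_equal_proof_string : Prop := ∀ (text : String), Dom_proof_string text → Spec_proof_string text (proof_string text)

-- ===== LEMMAS AND PROOFS =====

-- a clean recursion computing Python's str.replace for a NONEMPTY pattern o::os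
def pvRep (o : Char) (os : List Char) (new : List Char) (l : List Char) : List Char :=
  match l with
  | [] => []
  | c :: t =>
    if (o :: os).isPrefixOf (c :: t) then new ++ pvRep o os new (t.drop os.length)
    else c :: pvRep o os new t
termination_by l.length
decreasing_by all_goals (simp only [List.length_cons, List.length_drop]; omega)

theorem pvRep_cons (o : Char) (os new : List Char) (c : Char) (t : List Char) :
    pvRep o os new (c :: t) =
      if (o :: os).isPrefixOf (c :: t) then new ++ pvRep o os new (t.drop os.length)
      else c :: pvRep o os new t := by rw [pvRep]

theorem pvRep_go (o : Char) (os new : List Char) :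
    ∀ (fuel : Nat) (l acc : List Char), l.length ≤ fuel →
      PySem.Chars.replace.go (o :: os) new fuel l acc = acc.reverse ++ pvRep o os new l := by
  intro fuel
  induction fuel with
  | zero =>
    intro l acc h
    have : l = [] := by cases l <;> simp_all
    subst this
    simp [PySem.Chars.replace.go, pvRep]
  | succ f ih =>
    intro l acc h
    cases l with
    | nil => simp [PySem.Chars.replace.go, pvRep]
    | cons c t =>
      rw [PySem.Chars.replace.go]
      by_cases hp : (o :: os).isPrefixOf (c :: t) = true
      · rw [if_pos hp]
        rw [ih _ _ (by simp at h ⊢; omega)]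
        rw [pvRep, if_pos hp]
        simp
      · rw [if_neg hp]
        rw [ih _ _ (by simp at h ⊢; omega)]
        rw [pvRep, if_neg hp]
        simp

theorem replace_eq_pvRep (o : Char) (os new s : List Char) :
    PySem.Chars.replace s (o :: os) new = pvRep o os new s := by
  rw [PySem.Chars.replace]
  simp [pvRep_go o os new s.length s [] (le_refl _)]

-- ['x','d'] is a prefix of c :: l iff c = 'x' and l starts with 'd'
theorem prefix2_iff (x c : Char) (l : List Char) :
    (([x, 'd'] : List Char).isPrefixOf (c :: l)) = true ↔ c = x ∧ l.head? = some 'd' := by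
  cases l with
  | nil => simp [List.isPrefixOf]
  | cons a t =>
    simp [List.isPrefixOf]
    constructor
    · rintro ⟨h1, h2⟩; exact ⟨h1.symm, by rw [h2]⟩
    · rintro ⟨h1, h2⟩; exact ⟨h1.symm, h2.symm⟩

-- the head of a replace-output is 'd' only if the input's head was 'd' (replacement heads are 'w','2','3')
theorem pvRep_head_w (l : List Char) :
    (pvRep 'w' ['e','n','e','s','d','a','y'] ['w','e','d','n','e','s','d','a','y'] l).head? = some 'd' →
    l.head? = some 'd' := by
  cases l with
  | nil => simp [pvRep]
  | cons c t =>
    rw [pvRep]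
    split_ifs with h
    · intro hh; simp at hh
    · intro hh; simpa using hh

theorem pvRep_head_2 (l : List Char) :
    (pvRep '2' ['d'] ['2','n','d'] l).head? = some 'd' → l.head? = some 'd' := by
  cases l with
  | nil => simp [pvRep]
  | cons c t =>
    rw [pvRep]
    split_ifs with h
    · intro hh; simp at hh
    · intro hh; simpa using hh

-- "2d" never matches inside "wednesday"; replace distributes over that prefix
theorem rep2_wednesday (x : List Char) :
    pvRep '2' ['d'] ['2','n','d'] (['w','e','d','n','e','s','d','a','y'] ++ x) =
    ['w','e','d','n','e','s','d','a','y'] ++ pvRep '2' ['d'] ['2','n','d'] x := by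
  try simp only [List.cons_append, List.nil_append]
  rw [pvRep_cons]; try simp [List.isPrefixOf]
  rw [pvRep_cons]; try simp [List.isPrefixOf]
  rw [pvRep_cons]; try simp [List.isPrefixOf]
  rw [pvRep_cons]; try simp [List.isPrefixOf]
  rw [pvRep_cons]; try simp [List.isPrefixOf]
  rw [pvRep_cons]; try simp [List.isPrefixOf]
  rw [pvRep_cons]; try simp [List.isPrefixOf]
  rw [pvRep_cons]; try simp [List.isPrefixOf]
  rw [pvRep_cons]; try simp [List.isPrefixOf]

theorem rep3_wednesday (x : List Char) :
    pvRep '3' ['d'] ['3','r','d'] (['w','e','d','n','e','s','d','a','y'] ++ x) =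
    ['w','e','d','n','e','s','d','a','y'] ++ pvRep '3' ['d'] ['3','r','d'] x := by
  try simp only [List.cons_append, List.nil_append]
  rw [pvRep_cons]; try simp [List.isPrefixOf]
  rw [pvRep_cons]; try simp [List.isPrefixOf]
  rw [pvRep_cons]; try simp [List.isPrefixOf]
  rw [pvRep_cons]; try simp [List.isPrefixOf]
  rw [pvRep_cons]; try simp [List.isPrefixOf]
  rw [pvRep_cons]; try simp [List.isPrefixOf]
  rw [pvRep_cons]; try simp [List.isPrefixOf]
  rw [pvRep_cons]; try simp [List.isPrefixOf]
  rw [pvRep_cons]; try simp [List.isPrefixOf]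

theorem rep3_2nd (x : List Char) :
    pvRep '3' ['d'] ['3','r','d'] (['2','n','d'] ++ x) =
    ['2','n','d'] ++ pvRep '3' ['d'] ['3','r','d'] x := by
  try simp only [List.cons_append, List.nil_append]
  rw [pvRep_cons]; try simp [List.isPrefixOf]
  rw [pvRep_cons]; try simp [List.isPrefixOf]
  rw [pvRep_cons]; try simp [List.isPrefixOf]

theorem rep1_2d (t : List Char) :
    pvRep 'w' ['e','n','e','s','d','a','y'] ['w','e','d','n','e','s','d','a','y'] ('2' :: 'd' :: t) =
    '2' :: 'd' :: pvRep 'w' ['e','n','e','s','d','a','y'] ['w','e','d','n','e','s','d','a','y'] t := by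
  try simp only [List.cons_append, List.nil_append]
  rw [pvRep_cons]; try simp [List.isPrefixOf]
  rw [pvRep_cons]; try simp [List.isPrefixOf]

theorem rep1_3d (t : List Char) :
    pvRep 'w' ['e','n','e','s','d','a','y'] ['w','e','d','n','e','s','d','a','y'] ('3' :: 'd' :: t) =
    '3' :: 'd' :: pvRep 'w' ['e','n','e','s','d','a','y'] ['w','e','d','n','e','s','d','a','y'] t := by
  try simp only [List.cons_append, List.nil_append]
  rw [pvRep_cons]; try simp [List.isPrefixOf]
  rw [pvRep_cons]; try simp [List.isPrefixOf]

theorem rep2_3d (t : List Char) :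
    pvRep '2' ['d'] ['2','n','d'] ('3' :: 'd' :: t) =
    '3' :: 'd' :: pvRep '2' ['d'] ['2','n','d'] t := by
  try simp only [List.cons_append, List.nil_append]
  rw [pvRep_cons]; try simp [List.isPrefixOf]
  rw [pvRep_cons]; try simp [List.isPrefixOf]

-- the main equivalence on char lists
theorem main_eq : ∀ (n : Nat) (l : List Char), l.length ≤ n →
    pvRep '3' ['d'] ['3','r','d']
      (pvRep '2' ['d'] ['2','n','d']
        (pvRep 'w' ['e','n','e','s','d','a','y'] ['w','e','d','n','e','s','d','a','y'] l)) =
    pvScanB l := by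
  intro n
  induction n with
  | zero =>
    intro l h
    have : l = [] := by cases l <;> simp_all
    subst this
    simp [pvRep, pvScanB]
  | succ m ih =>
    intro l h
    cases l with
    | nil => simp [pvRep, pvScanB]
    | cons c t =>
      by_cases h1 : (['w','e','n','e','s','d','a','y'] : List Char).isPrefixOf (c :: t) = true
      · -- 'wenesday' matches here
        rw [pvScanB, if_pos h1]
        rw [pvRep, if_pos h1]
        rw [rep2_wednesday, rep3_wednesday]
        congr 1
        exact ih (t.drop 7) (by simp at h ⊢; omega)
      · by_cases h2 : (['2','d'] : List Char).isPrefixOf (c :: t) = true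
        · obtain ⟨hc, hh⟩ := (prefix2_iff '2' c t).mp h2
          subst hc
          cases t with
          | nil => simp at hh
          | cons a t' =>
            simp at hh; subst hh
            rw [pvScanB, if_neg h1, if_pos h2]
            rw [rep1_2d, pvRep_cons, if_pos (by simp [List.isPrefixOf])]
            simp only [List.length_cons, List.length_nil, List.drop_succ_cons, List.drop_zero]
            rw [rep3_2nd]
            congr 1
            exact ih t' (by simp at h ⊢; omega)
        · by_cases h3 : (['3','d'] : List Char).isPrefixOf (c :: t) = true
          · obtain ⟨hc, hh⟩ := (prefix2_iff '3' c t).mp h3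
            subst hc
            cases t with
            | nil => simp at hh
            | cons a t' =>
              simp at hh; subst hh
              rw [pvScanB, if_neg h1, if_neg h2, if_pos h3]
              rw [rep1_3d, rep2_3d, pvRep_cons, if_pos (by simp [List.isPrefixOf])]
              simp only [List.length_cons, List.length_nil, List.drop_succ_cons, List.drop_zero]
              congr 1
              exact ih t' (by simp at h ⊢; omega)
          · -- no pattern matches at this position
            rw [pvScanB, if_neg h1, if_neg h2, if_neg h3]
            rw [pvRep_cons, if_neg h1]
            have hd2 : (['2','d'] : List Char).isPrefixOf
                (c :: pvRep 'w' ['e','n','e','s','d','a','y'] ['w','e','d','n','e','s','d','a','y'] t) ≠ true := by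
              intro hcon
              obtain ⟨hc, hh⟩ := (prefix2_iff '2' c _).mp hcon
              exact h2 ((prefix2_iff '2' c t).mpr ⟨hc, pvRep_head_w t hh⟩)
            rw [pvRep_cons, if_neg hd2]
            have hd3 : (['3','d'] : List Char).isPrefixOf
                (c :: pvRep '2' ['d'] ['2','n','d'] (pvRep 'w' ['e','n','e','s','d','a','y'] ['w','e','d','n','e','s','d','a','y'] t)) ≠ true := by
              intro hcon
              obtain ⟨hc, hh⟩ := (prefix2_iff '3' c _).mp hcon
              exact h3 ((prefix2_iff '3' c t).mpr ⟨hc, pvRep_head_w t (pvRep_head_2 _ hh)⟩)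
            rw [pvRep_cons, if_neg hd3]
            congr 1
            exact ih t (by simp at h; omega)

-- ===== VERDICT (by name: the statement is the Claim_ definition above) =====
theorem proof_string_spec : Claim_equal_proof_string := by
  intro text _
  show proof_string text = proof_string_alt text
  have e1 : ("wenesday".toList) = ['w','e','n','e','s','d','a','y'] := rfl
  have e2 : ("wednesday".toList) = ['w','e','d','n','e','s','d','a','y'] := rfl
  have e3 : ("2d".toList) = ['2','d'] := rfl
  have e4 : ("2nd".toList) = ['2','n','d'] := rfl
  have e5 : ("3d".toList) = ['3','d'] := rfl
  have e6 : ("3rd".toList) = ['3','r','d'] := rfl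
  simp only [proof_string, proof_string_alt, PySem.Str.replace, String.toList_ofList,
    e1, e2, e3, e4, e5, e6, replace_eq_pvRep]
  exact congrArg String.ofList (main_eq text.toList.length text.toList (le_refl _))
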